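-- pv_equiv track=rewrite | github.com/fmalazemi/RL_Tradeoff | code1.py | generateLoops_reversedRotate
-- ===== SOURCE A (Python) =====
-- def line(row, rowMax, col, colMax, N):
--
--     l = []
--
--     for i in range(row, rowMax+1):
--
--         for j in range(col, colMax+1):
--
--             node = i*N + j
--
--             l.append(node)
--
--     return l
--
-- def generateSingleLoop(r1, c1, r2, c2, N):
--
--     l = []
--
--     l = l + line(r1, r1, c1, c2, N)
--
--     l = l + line(r1, r2, c2, c2, N)[1:]
--
--
--
--     r = line(r1, r2, c1, c1, N)
--
--     r = r + line(r2, r2, c1+1, c2, N)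
--
--     r = r[1:len(r)-1]
--
--     l = l + r[::-1]
--
--     return l
--
-- def generateLoops_reversedRotate(N, r1, c1, r2, c2, withoutD):
--
--     if r2-r1 == 1:
--
--         l1 = generateSingleLoop(r1, c1, r2, c2, N)
--
--         l2 = generateSingleLoop(r1, c1, r2, c2, N)
--
--         return [l1, l2[::-1]]
--
--     L = []
--
--
--
--     L.append(generateSingleLoop(r1, c1, r2, c2, N))
--
--     for i in range(r1+1, r2):
--
--         L.append(generateSingleLoop(r1, c1, i, c2, N)[::-1])
--
--     for i in range(r1+1, r2):
--
--         L.append(generateSingleLoop(i, c1, r2, c2, N)[::-1])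
--
--
--
--     if r1 != 0 and withoutD:
--
--         return L
--
--     for i in range(c1, c2):
--
--         L.append(generateSingleLoop(r1, i, r2, i+1, N)[::-1])
--
--     return L
-- ===== SOURCE B (Python) =====
-- # Segment-descriptor ("turtle") construction: every loop is emitted forward, in
-- # final order, from a short list of (start, direction, count) descriptors whose
-- # counts absorb the corner-dropping; no materialized list is ever sliced or
-- # reversed, and the top level builds a plan of rectangles first, then executes it.
--
-- def _rev(s):
--     (r, c, dr, dc, n) = s
--     return (r + dr * (n - 1), c + dc * (n - 1), -dr, -dc, n)
--
-- def _drop_first(segs):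
--     # drop one node from the front of the emitted sequence (count arithmetic)
--     if not segs:
--         return []
--     (r, c, dr, dc, n) = segs[0]
--     if n > 0:
--         return [(r + dr, c + dc, dr, dc, n - 1)] + segs[1:]
--     return [segs[0]] + _drop_first(segs[1:])
--
-- def _drop_last(segs):
--     # drop one node from the back of the emitted sequence (count arithmetic)
--     if not segs:
--         return []
--     head, tail = segs[0], segs[1:]
--     if any(n > 0 for (_, _, _, _, n) in tail):
--         return [head] + _drop_last(tail)
--     (r, c, dr, dc, n) = head
--     if n > 0:
--         return [(r, c, dr, dc, n - 1)] + tail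
--     return [head] + tail
--
-- def _ring_segs(r1, c1, r2, c2, rev):
--     w = c2 - c1
--     h = r2 - r1
--     top = (r1, c1, 0, 1, max(w + 1, 0))
--     right = (r1 + 1, c2, 1, 0, max(h, 0))
--     left = (r1, c1, 1, 0, max(h + 1, 0))
--     bottom = (r2, c1 + 1, 0, 1, max(w, 0))
--     if not rev:
--         return [top, right] + _drop_first(_drop_last([_rev(bottom), _rev(left)]))
--     return _drop_first(_drop_last([left, bottom])) + [_rev(right), _rev(top)]
--
-- def _emit(segs, N):
--     return [(r + dr * t) * N + (c + dc * t) for (r, c, dr, dc, n) in segs for t in range(n)]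
--
-- def generateLoops_reversedRotate(N, r1, c1, r2, c2, withoutD):
--     if r2 - r1 == 1:
--         return [_emit(_ring_segs(r1, c1, r2, c2, False), N),
--                 _emit(_ring_segs(r1, c1, r2, c2, True), N)]
--     plan = [(r1, c1, r2, c2, False)]
--     plan += [(r1, c1, i, c2, True) for i in range(r1 + 1, r2)]
--     plan += [(i, c1, r2, c2, True) for i in range(r1 + 1, r2)]
--     if not (r1 != 0 and withoutD):
--         plan += [(r1, i, r2, i + 1, True) for i in range(c1, c2)]
--     return [_emit(_ring_segs(a, b, c, d, rv), N) for (a, b, c, d, rv) in plan]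
-- ===== Notes on version B (the rewrite author's own statement) =====
-- stated objective: alternative
-- what changed: B replaces A's materialize-slice-reverse pipeline by a segment-descriptor (turtle) machine: each loop is a short list of (start,direction,count) descriptors, corner dropping is count arithmetic on descriptors, reversed loops are emitted directly in final order by reversed descriptors, and the top level first builds a plan of rectangles and then maps one generic emitter over it; no list is ever sliced or reversed.
import Mathlib
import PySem

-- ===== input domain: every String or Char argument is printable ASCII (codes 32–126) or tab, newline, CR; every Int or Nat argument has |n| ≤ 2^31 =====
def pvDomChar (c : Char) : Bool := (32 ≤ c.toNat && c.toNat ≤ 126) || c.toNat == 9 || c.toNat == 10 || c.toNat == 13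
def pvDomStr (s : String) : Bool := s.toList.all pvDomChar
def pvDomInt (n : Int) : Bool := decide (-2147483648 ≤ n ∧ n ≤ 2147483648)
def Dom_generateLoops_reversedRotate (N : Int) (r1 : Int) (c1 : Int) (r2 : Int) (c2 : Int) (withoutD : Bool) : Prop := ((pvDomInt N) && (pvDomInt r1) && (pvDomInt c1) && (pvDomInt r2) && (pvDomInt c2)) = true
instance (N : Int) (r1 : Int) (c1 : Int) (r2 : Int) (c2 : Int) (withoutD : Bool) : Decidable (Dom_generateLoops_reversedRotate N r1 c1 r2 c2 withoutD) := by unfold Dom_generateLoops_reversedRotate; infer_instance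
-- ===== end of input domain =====

-- B replaces A's materialize-slice-reverse loop construction by a segment-descriptor
-- (turtle) machine that emits every loop forward in final order; objective: alternative
-- algorithm of the same cost, same return value.

-- ===== PORT A =====
def line (row rowMax col colMax N : Int) : List Int :=
  (PySem.List.pyRange row (rowMax + 1) 1).foldl (fun l i =>
    (PySem.List.pyRange col (colMax + 1) 1).foldl (fun l j => l ++ [i * N + j]) l) []

def generateSingleLoop (r1 c1 r2 c2 N : Int) : List Int :=
  let l : List Int := []
  let l := l ++ line r1 r1 c1 c2 N
  let l := l ++ PySem.List.slice (line r1 r2 c2 c2 N) (some 1) none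
  let r := line r1 r2 c1 c1 N
  let r := r ++ line r2 r2 (c1 + 1) c2 N
  let r := PySem.List.slice r (some 1) (some ((r.length : Int) - 1))
  let l := l ++ r.reverse
  l

def generateLoops_reversedRotate (N : Int) (r1 : Int) (c1 : Int) (r2 : Int) (c2 : Int) (withoutD : Bool) : List (List Int) :=
  if r2 - r1 == 1 then
    let l1 := generateSingleLoop r1 c1 r2 c2 N
    let l2 := generateSingleLoop r1 c1 r2 c2 N
    [l1, l2.reverse]
  else
    let L : List (List Int) := []
    let L := L ++ [generateSingleLoop r1 c1 r2 c2 N]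
    let L := (PySem.List.pyRange (r1 + 1) r2 1).foldl
      (fun L i => L ++ [(generateSingleLoop r1 c1 i c2 N).reverse]) L
    let L := (PySem.List.pyRange (r1 + 1) r2 1).foldl
      (fun L i => L ++ [(generateSingleLoop i c1 r2 c2 N).reverse]) L
    if (r1 != 0) && withoutD then L
    else (PySem.List.pyRange c1 c2 1).foldl
      (fun L i => L ++ [(generateSingleLoop r1 i r2 (i + 1) N).reverse]) L

-- ===== PORT B =====
-- a segment descriptor: start (r,c), direction (dr,dc), node count n
structure Seg where
  r : Int
  c : Int
  dr : Int
  dc : Int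
  n : Int
deriving DecidableEq, Repr

def segRev (s : Seg) : Seg :=
  ⟨s.r + s.dr * (s.n - 1), s.c + s.dc * (s.n - 1), -s.dr, -s.dc, s.n⟩

def dropFirstSegs : List Seg → List Seg
  | [] => []
  | s :: rest =>
    if 0 < s.n then ⟨s.r + s.dr, s.c + s.dc, s.dr, s.dc, s.n - 1⟩ :: rest
    else s :: dropFirstSegs rest

def dropLastSegs : List Seg → List Seg
  | [] => []
  | s :: rest =>
    if rest.any (fun u => decide (0 < u.n)) then s :: dropLastSegs rest
    else if 0 < s.n then ⟨s.r, s.c, s.dr, s.dc, s.n - 1⟩ :: rest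
    else s :: rest

def ringSegs (r1 c1 r2 c2 : Int) (rev : Bool) : List Seg :=
  let w := c2 - c1
  let h := r2 - r1
  let top : Seg := ⟨r1, c1, 0, 1, max (w + 1) 0⟩
  let right : Seg := ⟨r1 + 1, c2, 1, 0, max h 0⟩
  let left : Seg := ⟨r1, c1, 1, 0, max (h + 1) 0⟩
  let bottom : Seg := ⟨r2, c1 + 1, 0, 1, max w 0⟩
  if !rev then
    [top, right] ++ dropFirstSegs (dropLastSegs [segRev bottom, segRev left])
  else
    dropFirstSegs (dropLastSegs [left, bottom]) ++ [segRev right, segRev top]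

def emitSegs (segs : List Seg) (N : Int) : List Int :=
  segs.flatMap (fun s =>
    (PySem.List.pyRange 0 s.n 1).map (fun t => (s.r + s.dr * t) * N + (s.c + s.dc * t)))

def generateLoops_reversedRotate_alt (N : Int) (r1 : Int) (c1 : Int) (r2 : Int) (c2 : Int) (withoutD : Bool) : List (List Int) :=
  if r2 - r1 == 1 then
    [emitSegs (ringSegs r1 c1 r2 c2 false) N, emitSegs (ringSegs r1 c1 r2 c2 true) N]
  else
    let plan : List (Int × Int × Int × Int × Bool) := [(r1, c1, r2, c2, false)]
    let plan := plan ++ (PySem.List.pyRange (r1 + 1) r2 1).map (fun i => (r1, c1, i, c2, true))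
    let plan := plan ++ (PySem.List.pyRange (r1 + 1) r2 1).map (fun i => (i, c1, r2, c2, true))
    let plan := if !((r1 != 0) && withoutD) then
        plan ++ (PySem.List.pyRange c1 c2 1).map (fun i => (r1, i, r2, i + 1, true))
      else plan
    plan.map (fun p => emitSegs (ringSegs p.1 p.2.1 p.2.2.1 p.2.2.2.1 p.2.2.2.2) N)

-- ===== PRECONDITION & SPEC =====
def Spec_generateLoops_reversedRotate (N : Int) (r1 : Int) (c1 : Int) (r2 : Int) (c2 : Int) (withoutD : Bool) (out : List (List Int)) : Prop := out = generateLoops_reversedRotate_alt N r1 c1 r2 c2 withoutD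
instance (N : Int) (r1 : Int) (c1 : Int) (r2 : Int) (c2 : Int) (withoutD : Bool) (out : List (List Int)) : Decidable (Spec_generateLoops_reversedRotate N r1 c1 r2 c2 withoutD out) := by unfold Spec_generateLoops_reversedRotate; infer_instance

-- ===== CLAIM (what is proved, stated in full; the proofs are below) =====
def Claim_equal_generateLoops_reversedRotate : Prop := ∀ (N : Int) (r1 : Int) (c1 : Int) (r2 : Int) (c2 : Int) (withoutD : Bool), Dom_generateLoops_reversedRotate N r1 c1 r2 c2 withoutD → Spec_generateLoops_reversedRotate N r1 c1 r2 c2 withoutD (generateLoops_reversedRotate N r1 c1 r2 c2 withoutD)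


-- ===== LEMMAS AND PROOFS =====

-- canonical form of one segment's emission
def segList (r c dr dc n N : Int) : List Int :=
  (PySem.List.pyRange 0 n 1).map (fun t => (r + dr * t) * N + (c + dc * t))

theorem length_segList (r c dr dc n N : Int) : (segList r c dr dc n N).length = n.toNat := by
  simp [segList, PySem.List.length_pyRange_one]

theorem getElem_segList (r c dr dc n N : Int) (i : Nat) (h : i < (segList r c dr dc n N).length) :
    (segList r c dr dc n N)[i] = (r + dr * i) * N + (c + dc * i) := by
  simp only [segList, List.getElem_map]
  rw [PySem.List.getElem_pyRange_one]
  ring_nf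

theorem segList_ext {a b c d e a' b' c' d' e' : Int} (N : Int)
    (h1 : a = a') (h2 : b = b') (h3 : c = c') (h4 : d = d') (h5 : e = e') :
    segList a b c d e N = segList a' b' c' d' e' N := by
  subst h1; subst h2; subst h3; subst h4; subst h5; rfl

theorem segList_nonpos (r c dr dc n N : Int) (h : n ≤ 0) : segList r c dr dc n N = [] := by
  unfold segList
  rw [PySem.List.pyRange_one_eq_nil (by omega)]
  rfl

theorem segList_ne_nil (r c dr dc n N : Int) (h : 0 < n) : segList r c dr dc n N ≠ [] := by
  intro hc
  have := congrArg List.length hc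
  rw [length_segList] at this
  simp at this
  omega

theorem segList_max (r c dr dc n N : Int) :
    segList r c dr dc (max n 0) N = segList r c dr dc n N := by
  rcases le_or_gt n 0 with h | h
  · rw [max_eq_right h, segList_nonpos _ _ _ _ _ _ h, segList_nonpos _ _ _ _ _ _ le_rfl]
  · rw [max_eq_left h.le]

theorem tail_segList (r c dr dc n N : Int) :
    (segList r c dr dc n N).tail = segList (r + dr) (c + dc) dr dc (n - 1) N := by
  rcases le_or_gt n 0 with h | h
  · rw [segList_nonpos _ _ _ _ _ _ h, segList_nonpos _ _ _ _ _ _ (by omega)]; rfl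
  · apply List.ext_getElem
    · simp only [List.length_tail, length_segList]; omega
    · intro i h1 h2
      rw [List.getElem_tail, getElem_segList, getElem_segList]
      push_cast; ring

theorem dropLast_segList (r c dr dc n N : Int) :
    (segList r c dr dc n N).dropLast = segList r c dr dc (n - 1) N := by
  rcases le_or_gt n 0 with h | h
  · rw [segList_nonpos _ _ _ _ _ _ h, segList_nonpos _ _ _ _ _ _ (by omega)]; rfl
  · apply List.ext_getElem
    · simp only [List.length_dropLast, length_segList]; omega
    · intro i h1 h2
      rw [List.getElem_dropLast, getElem_segList, getElem_segList]

theorem reverse_segList (r c dr dc n N : Int) :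
    (segList r c dr dc n N).reverse
      = segList (r + dr * (n - 1)) (c + dc * (n - 1)) (-dr) (-dc) n N := by
  rcases le_or_gt n 0 with h | h
  · rw [segList_nonpos _ _ _ _ _ _ h, segList_nonpos _ _ _ _ _ _ h]; rfl
  · apply List.ext_getElem
    · simp [length_segList]
    · intro i h1 h2
      rw [List.length_reverse, length_segList] at h1
      rw [List.getElem_reverse, getElem_segList, getElem_segList]
      rw [length_segList]
      have hc : ((n.toNat - 1 - i : Nat) : Int) = n - 1 - (i : Int) := by omega
      rw [hc]; ring

-- reversing commutes with dropping the first and last element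
theorem reverse_tail_dropLast {A : Type} (xs : List A) :
    (xs.tail.dropLast).reverse = xs.reverse.tail.dropLast := by
  apply List.ext_getElem
  · simp [List.length_tail, List.length_dropLast]
  · intro i h1 h2
    simp only [List.length_reverse, List.length_dropLast, List.length_tail] at h1 h2
    rw [List.getElem_reverse, List.getElem_dropLast, List.getElem_tail,
      List.getElem_dropLast, List.getElem_tail, List.getElem_reverse]
    congr 1
    simp only [List.length_dropLast, List.length_tail] at *
    omega

-- A's pieces as canonical segments
theorem line_row (r c1 c2 N : Int) :
    line r r c1 c2 N = segList r c1 0 1 (c2 + 1 - c1) N := by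
  unfold line
  rw [PySem.List.pyRange_one_singleton]
  simp only [List.foldl]
  rw [PySem.List.foldl_append_singleton_eq_map]
  simp only [List.nil_append]
  apply List.ext_getElem
  · simp [length_segList, PySem.List.length_pyRange_one]
  · intro i h1 h2
    rw [List.getElem_map, PySem.List.getElem_pyRange_one, getElem_segList]
    ring

theorem line_col (r1 r2 c N : Int) :
    line r1 r2 c c N = segList r1 c 1 0 (r2 + 1 - r1) N := by
  unfold line
  have h : (fun (l : List Int) (i : Int) =>
      (PySem.List.pyRange c (c + 1) 1).foldl (fun l j => l ++ [i * N + j]) l)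
      = fun l i => l ++ [i * N + c] := by
    funext l i
    rw [PySem.List.pyRange_one_singleton]
    simp [List.foldl]
  rw [h, PySem.List.foldl_append_singleton_eq_map]
  simp only [List.nil_append]
  apply List.ext_getElem
  · simp [length_segList, PySem.List.length_pyRange_one]
  · intro i h1 h2
    rw [List.getElem_map, PySem.List.getElem_pyRange_one, getElem_segList]
    ring

-- xs[1:len(xs)-1] is tail-then-dropLast
theorem slice_mid (xs : List Int) :
    PySem.List.slice xs (some 1) (some ((xs.length : Int) - 1)) = xs.tail.dropLast := by
  rcases xs with _ | ⟨x, t⟩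
  · rfl
  · have h2 : (((x :: t).length : Int)) - 1 = ((t.length : Nat) : Int) := by simp
    rw [h2, show (1 : Int) = ((1 : Nat) : Int) from rfl, PySem.List.slice_natCast]
    simp [List.dropLast_eq_take]

-- A's single loop in canonical shape
theorem gsl_shape (r1 c1 r2 c2 N : Int) :
    generateSingleLoop r1 c1 r2 c2 N
      = segList r1 c1 0 1 (c2 - c1 + 1) N
        ++ segList (r1 + 1) c2 1 0 (r2 - r1) N
        ++ ((segList r2 c2 0 (-1) (c2 - c1) N
              ++ segList r2 c1 (-1) 0 (r2 - r1 + 1) N).tail.dropLast) := by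
  unfold generateSingleLoop
  simp only [List.nil_append]
  rw [line_row r1 c1 c2 N, line_col r1 r2 c2 N, line_col r1 r2 c1 N, line_row r2 (c1 + 1) c2 N,
    PySem.List.slice_from_one, tail_segList, slice_mid, reverse_tail_dropLast,
    List.reverse_append, reverse_segList, reverse_segList]
  rw [segList_ext N (rfl : r1 = r1) rfl rfl rfl (by ring : c2 + 1 - c1 = c2 - c1 + 1)]
  rw [segList_ext N (rfl : r1 + 1 = r1 + 1) (by ring : c2 + 0 = c2) rfl rfl
    (by ring : r2 + 1 - r1 - 1 = r2 - r1)]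
  rw [segList_ext N (by ring : r2 + 0 * (c2 + 1 - (c1 + 1) - 1) = r2)
    (by ring : c1 + 1 + 1 * (c2 + 1 - (c1 + 1) - 1) = c2) (by ring : -0 = (0 : Int)) rfl
    (by ring : c2 + 1 - (c1 + 1) = c2 - c1)]
  rw [segList_ext N (by ring : r1 + 1 * (r2 + 1 - r1 - 1) = r2)
    (by ring : c1 + 0 * (r2 + 1 - r1 - 1) = c1) rfl (by ring : -0 = (0 : Int))
    (by ring : r2 + 1 - r1 = r2 - r1 + 1)]

-- emission distributes over descriptor concatenation
theorem emitSegs_append (x y : List Seg) (N : Int) :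
    emitSegs (x ++ y) N = emitSegs x N ++ emitSegs y N := by
  unfold emitSegs; exact List.flatMap_append

theorem emitSegs_cons (s : Seg) (x : List Seg) (N : Int) :
    emitSegs (s :: x) N = segList s.r s.c s.dr s.dc s.n N ++ emitSegs x N := rfl

theorem emitSegs_nil (N : Int) : emitSegs [] N = [] := rfl

-- the trim machine on two descriptors = tail-and-dropLast of the emitted concatenation
theorem emit_trim2 (s t : Seg) (N : Int) :
    emitSegs (dropFirstSegs (dropLastSegs [s, t])) N
      = (segList s.r s.c s.dr s.dc s.n N ++ segList t.r t.c t.dr t.dc t.n N).tail.dropLast := by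
  rcases le_or_gt t.n 0 with ht | ht
  · -- t emits nothing
    have hT : segList t.r t.c t.dr t.dc t.n N = [] := segList_nonpos _ _ _ _ _ _ ht
    have ht' : ¬ 0 < t.n := by omega
    have hany : [t].any (fun u => decide (0 < u.n)) = false := by simp [ht']
    rcases le_or_gt s.n 0 with hs | hs
    · have hs' : ¬ 0 < s.n := by omega
      have h1 : dropFirstSegs (dropLastSegs [s, t]) = [s, t] := by
        simp [dropLastSegs, dropFirstSegs, hany, hs', ht']
      rw [h1, emitSegs_cons, emitSegs_cons, emitSegs_nil, hT,
        segList_nonpos _ _ _ _ _ _ hs]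
      rfl
    · have h1 : dropLastSegs [s, t] = [⟨s.r, s.c, s.dr, s.dc, s.n - 1⟩, t] := by
        simp [dropLastSegs, hany, hs]
      rw [h1]
      rcases le_or_gt (s.n - 1) 0 with hs1 | hs1
      · have hs1' : ¬ (1 : Int) < s.n := by omega
        have hs1'' : ¬ 0 < s.n - 1 := by omega
        have h2 : dropFirstSegs [(⟨s.r, s.c, s.dr, s.dc, s.n - 1⟩ : Seg), t]
            = [⟨s.r, s.c, s.dr, s.dc, s.n - 1⟩, t] := by
          simp [dropFirstSegs, hs1', ht']
        rw [h2, emitSegs_cons, emitSegs_cons, emitSegs_nil, hT]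
        dsimp only
        rw [segList_nonpos _ _ _ _ _ _ hs1]
        simp only [List.append_nil]
        rw [tail_segList, dropLast_segList, segList_nonpos _ _ _ _ _ _ (by omega)]
      · have hs1' : (1 : Int) < s.n := by omega
        have h2 : dropFirstSegs [(⟨s.r, s.c, s.dr, s.dc, s.n - 1⟩ : Seg), t]
            = [⟨s.r + s.dr, s.c + s.dc, s.dr, s.dc, s.n - 1 - 1⟩, t] := by
          simp [dropFirstSegs, hs1']
        rw [h2, emitSegs_cons, emitSegs_cons, emitSegs_nil, hT]
        dsimp only
        simp only [List.append_nil]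
        rw [tail_segList, dropLast_segList]
  · -- t emits something
    have hT : segList t.r t.c t.dr t.dc t.n N ≠ [] := segList_ne_nil _ _ _ _ _ _ ht
    have hany : [t].any (fun u => decide (0 < u.n)) = true := by simp [ht]
    have h1 : dropLastSegs [s, t] = [s, ⟨t.r, t.c, t.dr, t.dc, t.n - 1⟩] := by
      simp [dropLastSegs, hany, ht]
    rw [h1]
    rcases le_or_gt s.n 0 with hs | hs
    · have hs' : ¬ 0 < s.n := by omega
      have hS : segList s.r s.c s.dr s.dc s.n N = [] := segList_nonpos _ _ _ _ _ _ hs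
      rcases le_or_gt (t.n - 1) 0 with ht1 | ht1
      · have ht1' : ¬ (1 : Int) < t.n := by omega
        have ht1'' : ¬ 0 < t.n - 1 := by omega
        have h2 : dropFirstSegs [s, (⟨t.r, t.c, t.dr, t.dc, t.n - 1⟩ : Seg)]
            = [s, ⟨t.r, t.c, t.dr, t.dc, t.n - 1⟩] := by
          simp [dropFirstSegs, hs', ht1']
        rw [h2, emitSegs_cons, emitSegs_cons, emitSegs_nil, hS]
        dsimp only
        rw [segList_nonpos _ _ _ _ _ _ ht1]
        simp only [List.append_nil, List.nil_append]
        rw [tail_segList, dropLast_segList, segList_nonpos _ _ _ _ _ _ (by omega)]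
      · have ht1x : (1 : Int) < t.n := by omega
        have h2 : dropFirstSegs [s, (⟨t.r, t.c, t.dr, t.dc, t.n - 1⟩ : Seg)]
            = [s, ⟨t.r + t.dr, t.c + t.dc, t.dr, t.dc, t.n - 1 - 1⟩] := by
          simp [dropFirstSegs, hs', ht1x]
        rw [h2, emitSegs_cons, emitSegs_cons, emitSegs_nil, hS]
        dsimp only
        simp only [List.append_nil, List.nil_append]
        rw [tail_segList, dropLast_segList]
    · have hS : segList s.r s.c s.dr s.dc s.n N ≠ [] := segList_ne_nil _ _ _ _ _ _ hs
      have h2 : dropFirstSegs [s, (⟨t.r, t.c, t.dr, t.dc, t.n - 1⟩ : Seg)]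
          = [⟨s.r + s.dr, s.c + s.dc, s.dr, s.dc, s.n - 1⟩, ⟨t.r, t.c, t.dr, t.dc, t.n - 1⟩] := by
        simp [dropFirstSegs, hs]
      rw [h2, emitSegs_cons, emitSegs_cons, emitSegs_nil, List.append_nil]
      dsimp only
      rw [List.tail_append_of_ne_nil hS, List.dropLast_append_of_ne_nil hT,
        tail_segList, dropLast_segList]

-- the single loop, forward: A's generateSingleLoop = B's forward descriptors
theorem forward_eq (r1 c1 r2 c2 N : Int) :
    generateSingleLoop r1 c1 r2 c2 N = emitSegs (ringSegs r1 c1 r2 c2 false) N := by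
  have hr : ringSegs r1 c1 r2 c2 false
      = [⟨r1, c1, 0, 1, max (c2 - c1 + 1) 0⟩, ⟨r1 + 1, c2, 1, 0, max (r2 - r1) 0⟩]
        ++ dropFirstSegs (dropLastSegs
            [segRev ⟨r2, c1 + 1, 0, 1, max (c2 - c1) 0⟩,
             segRev ⟨r1, c1, 1, 0, max (r2 - r1 + 1) 0⟩]) := rfl
  have eB : segList (r2 + 0 * (max (c2 - c1) 0 - 1)) (c1 + 1 + 1 * (max (c2 - c1) 0 - 1))
      (-0) (-1) (max (c2 - c1) 0) N = segList r2 c2 0 (-1) (c2 - c1) N := by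
    rcases le_or_gt (c2 - c1) 0 with h | h
    · rw [max_eq_right h, segList_nonpos _ _ _ _ _ _ le_rfl, segList_nonpos _ _ _ _ _ _ h]
    · rw [max_eq_left h.le]
      exact segList_ext N (by ring) (by ring) (by ring) rfl rfl
  have eL : segList (r1 + 1 * (max (r2 - r1 + 1) 0 - 1)) (c1 + 0 * (max (r2 - r1 + 1) 0 - 1))
      (-1) (-0) (max (r2 - r1 + 1) 0) N = segList r2 c1 (-1) 0 (r2 - r1 + 1) N := by
    rcases le_or_gt (r2 - r1 + 1) 0 with h | h
    · rw [max_eq_right h, segList_nonpos _ _ _ _ _ _ le_rfl, segList_nonpos _ _ _ _ _ _ h]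
    · rw [max_eq_left h.le]
      exact segList_ext N (by ring) (by ring) rfl (by ring) rfl
  rw [gsl_shape, hr, emitSegs_append, emitSegs_cons, emitSegs_cons, emitSegs_nil,
    List.append_nil, emit_trim2]
  dsimp only [segRev]
  rw [segList_max, segList_max, eB, eL]

-- the single loop, reversed:  A's reversed loop = B's reversed descriptors
theorem backward_eq (r1 c1 r2 c2 N : Int) :
    (generateSingleLoop r1 c1 r2 c2 N).reverse = emitSegs (ringSegs r1 c1 r2 c2 true) N := by
  have hr : ringSegs r1 c1 r2 c2 true
      = dropFirstSegs (dropLastSegs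
            [⟨r1, c1, 1, 0, max (r2 - r1 + 1) 0⟩, ⟨r2, c1 + 1, 0, 1, max (c2 - c1) 0⟩])
        ++ [segRev ⟨r1 + 1, c2, 1, 0, max (r2 - r1) 0⟩,
            segRev ⟨r1, c1, 0, 1, max (c2 - c1 + 1) 0⟩] := rfl
  have eLrev : segList (r2 + -1 * (r2 - r1 + 1 - 1)) (c1 + 0 * (r2 - r1 + 1 - 1))
      (- -1) (-0) (r2 - r1 + 1) N = segList r1 c1 1 0 (r2 - r1 + 1) N :=
    segList_ext N (by ring) (by ring) (by ring) (by ring) rfl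
  have eBrev : segList (r2 + 0 * (c2 - c1 - 1)) (c2 + -1 * (c2 - c1 - 1))
      (-0) (- -1) (c2 - c1) N = segList r2 (c1 + 1) 0 1 (c2 - c1) N :=
    segList_ext N (by ring) (by ring) (by ring) (by ring) rfl
  have eRrev : segList (r1 + 1 + 1 * (r2 - r1 - 1)) (c2 + 0 * (r2 - r1 - 1))
      (-1) (-0) (r2 - r1) N
      = segList (r1 + 1 + 1 * (max (r2 - r1) 0 - 1)) (c2 + 0 * (max (r2 - r1) 0 - 1))
        (-1) (-0) (max (r2 - r1) 0) N := by
    rcases le_or_gt (r2 - r1) 0 with h | h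
    · rw [segList_nonpos _ _ _ _ _ _ h, max_eq_right h, segList_nonpos _ _ _ _ _ _ le_rfl]
    · rw [max_eq_left h.le]
  have eTrev : segList (r1 + 0 * (c2 - c1 + 1 - 1)) (c1 + 1 * (c2 - c1 + 1 - 1))
      (-0) (-1) (c2 - c1 + 1) N
      = segList (r1 + 0 * (max (c2 - c1 + 1) 0 - 1)) (c1 + 1 * (max (c2 - c1 + 1) 0 - 1))
        (-0) (-1) (max (c2 - c1 + 1) 0) N := by
    rcases le_or_gt (c2 - c1 + 1) 0 with h | h
    · rw [segList_nonpos _ _ _ _ _ _ h, max_eq_right h, segList_nonpos _ _ _ _ _ _ le_rfl]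
    · rw [max_eq_left h.le]
  rw [gsl_shape, hr, emitSegs_append, emitSegs_cons, emitSegs_cons, emitSegs_nil,
    List.append_nil, emit_trim2]
  dsimp only [segRev]
  rw [List.reverse_append, List.reverse_append, reverse_tail_dropLast, List.reverse_append,
    reverse_segList, reverse_segList, reverse_segList, reverse_segList]
  rw [segList_max, segList_max, eLrev, eBrev, eRrev, eTrev]

theorem emit_rev (r1 c1 r2 c2 N : Int) :
    (emitSegs (ringSegs r1 c1 r2 c2 false) N).reverse = emitSegs (ringSegs r1 c1 r2 c2 true) N := by
  rw [← forward_eq, backward_eq]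

theorem main_eq (N r1 c1 r2 c2 : Int) (withoutD : Bool) :
    generateLoops_reversedRotate N r1 c1 r2 c2 withoutD
      = generateLoops_reversedRotate_alt N r1 c1 r2 c2 withoutD := by
  unfold generateLoops_reversedRotate generateLoops_reversedRotate_alt
  by_cases h1 : r2 - r1 == 1
  · simp only [h1, if_true, forward_eq, emit_rev]
  · simp only [h1, if_false, Bool.false_eq_true,
      PySem.List.foldl_append_singleton_eq_map]
    by_cases h2 : ((r1 != 0) && withoutD) = true
    · simp [h2, forward_eq, emit_rev, List.map_map, Function.comp_def]
    · simp [h2, forward_eq, emit_rev, List.map_map, Function.comp_def]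

-- ===== VERDICT (by name: the statement is the Claim_ definition above) =====
theorem generateLoops_reversedRotate_spec : Claim_equal_generateLoops_reversedRotate := by
  intro N r1 c1 r2 c2 withoutD _
  exact main_eq N r1 c1 r2 c2 withoutD
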